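-- pv_equiv track=rewrite | github.com/alouatiq/TA | BE/trading_core/sentiment/forex.py | _filter_by_pairs
-- ===== SOURCE A (Python) =====
-- from typing import Iterable, List, Tuple, Dict, Any, Optional
--
-- def _filter_by_pairs(titles: Iterable[str], pairs_compact: List[str]) -> List[str]:
--     """
--     Keep titles mentioning any of the requested pairs (in compact or slash form).
--     """
--     out: List[str] = []
--     seen = set()
--     # also consider 'EUR/USD' form for each requested pair
--     slash_forms = {f"{p[:3]}/{p[3:]}" for p in pairs_compact}
--     for title in titles:
--         t_up = title.upper()
--         hit = False
--         for p in pairs_compact: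
--             if p in t_up:
--                 hit = True
--                 break
--         if not hit:
--             for s in slash_forms:
--                 if s in t_up:
--                     hit = True
--                     break
--         if hit and title not in seen:
--             seen.add(title)
--             out.append(title)
--     return out
-- ===== SOURCE B (Python) =====
-- def _filter_by_pairs(titles, pairs_compact):
--     """
--     Keep titles mentioning any of the requested pairs (in compact or slash form).
--     Staged, pattern-major algorithm: (1) ordered dedup of the titles, (2) for
--     each pattern form, mark every deduped title containing it in a parallel
--     boolean array, (3) compress the marked titles out.
--     """
--     uniq = list(dict.fromkeys(titles))
--     ups = [t.upper() for t in uniq]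
--     hit = [False] * len(uniq)
--     for p in pairs_compact:
--         for form in (p, p[:3] + "/" + p[3:]):
--             for i, u in enumerate(ups):
--                 if form in u:
--                     hit[i] = True
--     return [t for ok, t in zip(hit, uniq) if ok]
-- ===== Notes on version B (the rewrite author's own statement) =====
-- stated objective: alternative
-- what changed: A makes one title-major pass that scans the needles per title with early break and dedups on the fly via a seen set; B is a staged pattern-major algorithm: an ordered-dedup pass over the titles, then for each pattern form a marking sweep over a parallel boolean array, then a compress pass emitting the marked titles.
import Mathlib
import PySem

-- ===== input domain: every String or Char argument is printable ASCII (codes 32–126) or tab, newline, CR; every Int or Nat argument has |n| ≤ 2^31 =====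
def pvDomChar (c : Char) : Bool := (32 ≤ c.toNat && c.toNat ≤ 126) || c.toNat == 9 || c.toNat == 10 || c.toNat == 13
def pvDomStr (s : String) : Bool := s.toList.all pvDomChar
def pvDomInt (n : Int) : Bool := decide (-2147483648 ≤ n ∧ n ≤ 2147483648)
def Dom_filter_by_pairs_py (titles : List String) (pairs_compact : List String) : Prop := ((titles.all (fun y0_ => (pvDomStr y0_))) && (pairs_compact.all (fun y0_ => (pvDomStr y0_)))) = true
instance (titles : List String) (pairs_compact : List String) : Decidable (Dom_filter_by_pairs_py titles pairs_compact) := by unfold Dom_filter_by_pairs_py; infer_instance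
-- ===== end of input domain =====

-- B replaces A's single title-major loop (scan needles per title with early break + seen-set dedup)
-- by a staged pattern-major algorithm: ordered dedup pass, then per-pattern marking of a parallel
-- boolean array, then a compress pass. Objective: alternative (same asymptotic cost).


-- ===== PORT A =====
-- f"{p[:3]}/{p[3:]}" (string concatenation done on the code-point list, exact for any p)
def pvSlashForm (p : String) : String :=
  String.ofList (PySem.Chars.slice p.toList none (some 3) ++ '/' :: PySem.Chars.slice p.toList (some 3) none)

def filter_by_pairs_py (titles : List String) (pairs_compact : List String) : List String :=
  -- slash_forms is a Python set; it is only consumed by an order-independent any-hit scan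
  let slash_forms : PySem.Set String := PySem.Set.ofList (pairs_compact.map pvSlashForm)
  (titles.foldl (fun (st : List String × PySem.Set String) title =>
      let t_up := PySem.Str.upper title
      let hit := pairs_compact.any (fun p => PySem.Str.isIn p t_up)
      let hit := if hit then hit else slash_forms.any (fun s => PySem.Str.isIn s t_up)
      if hit && !(PySem.Set.contains st.2 title) then
        (st.1 ++ [title], PySem.Set.add st.2 title)
      else st) ([], PySem.Set.empty)).1

-- ===== PORT B =====
def filter_by_pairs_py_alt (titles : List String) (pairs_compact : List String) : List String :=
  -- pass 1: ordered dedup (list(dict.fromkeys(titles))) and the uppercase forms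
  let uniq := PySem.List.dedup titles
  let ups := uniq.map PySem.Str.upper
  -- pass 2: pattern-major marking; the in-place loop 'for i, u in enumerate(ups): if form in u:
  -- hit[i] = True' is ported as a zipWith over (hit, ups)
  let hit := pairs_compact.foldl (fun hit p =>
      [p, pvSlashForm p].foldl (fun hit form =>
        List.zipWith (fun b u => b || PySem.Str.isIn form u) hit ups) hit)
    (List.replicate uniq.length false)
  -- pass 3: compress
  ((hit.zip uniq).filter (fun bt => bt.1)).map (·.2)

-- ===== PRECONDITION & SPEC =====
def Spec_filter_by_pairs_py (titles : List String) (pairs_compact : List String) (out : List String) : Prop := out = filter_by_pairs_py_alt titles pairs_compact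
instance (titles : List String) (pairs_compact : List String) (out : List String) : Decidable (Spec_filter_by_pairs_py titles pairs_compact out) := by unfold Spec_filter_by_pairs_py; infer_instance

-- ===== CLAIM (what is proved, stated in full; the proofs are below) =====
def Claim_equal_filter_by_pairs_py : Prop := ∀ (titles : List String) (pairs_compact : List String), Dom_filter_by_pairs_py titles pairs_compact → Spec_filter_by_pairs_py titles pairs_compact (filter_by_pairs_py titles pairs_compact)

-- ===== LEMMAS AND PROOFS =====

-- A's per-title hit test equals the any over compact pairs and slash forms together.
lemma pvHit_eq (pairs_compact : List String) (title : String) :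
    (if pairs_compact.any (fun p => PySem.Str.isIn p (PySem.Str.upper title)) then
       pairs_compact.any (fun p => PySem.Str.isIn p (PySem.Str.upper title))
     else
       (PySem.Set.ofList (pairs_compact.map pvSlashForm)).any
         (fun s => PySem.Str.isIn s (PySem.Str.upper title)))
    = (pairs_compact ++ pairs_compact.map pvSlashForm).any
        (fun n => PySem.Str.isIn n (PySem.Str.upper title)) := by
  rw [Bool.eq_iff_iff]
  constructor
  · intro h
    split at h
    · next hh => rw [List.any_append]; exact (Bool.or_eq_true _ _).mpr (Or.inl hh)
    · rcases List.any_eq_true.mp h with ⟨s, hs, hin⟩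
      rw [PySem.Set.mem_ofList] at hs
      exact List.any_eq_true.mpr ⟨s, List.mem_append.mpr (Or.inr hs), hin⟩
  · intro h
    rcases List.any_eq_true.mp h with ⟨n, hn, hin⟩
    rcases List.mem_append.mp hn with hn | hn
    · have hp : pairs_compact.any (fun p => PySem.Str.isIn p (PySem.Str.upper title)) = true :=
        List.any_eq_true.mpr ⟨n, hn, hin⟩
      rw [if_pos hp]; exact hp
    · split
      · next hh => exact hh
      · exact List.any_eq_true.mpr ⟨n, by rw [PySem.Set.mem_ofList]; exact hn, hin⟩

-- A's loop, generalized over the hit predicate and a start state whose seen-set equals the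
-- output list, produces the hit-filtered ordered dedup of the remaining titles.
lemma pvLoop_eq (h : String → Bool) :
    ∀ (ts : List String) (out : List String),
      ts.foldl (fun (st : List String × PySem.Set String) title =>
          if h title && !(PySem.Set.contains st.2 title) then
            (st.1 ++ [title], PySem.Set.add st.2 title)
          else st) (out, out)
      = (out ++ (PySem.List.dedup ts).filter (fun t => h t && !(decide (t ∈ out))),
         out ++ (PySem.List.dedup ts).filter (fun t => h t && !(decide (t ∈ out)))) := by
  intro ts
  induction ts with
  | nil => intro out; simp
  | cons t rest ih =>
    intro out
    have hded : PySem.List.dedup (t :: rest)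
        = t :: (PySem.List.dedup rest).filter (fun y => !(y == t)) := by
      show PySem.Set.ofList (t :: rest) = _
      rw [PySem.Set.ofList_cons]
      rfl
    simp only [List.foldl_cons]
    by_cases hmem : t ∈ out
    · rw [if_neg (by simp [hmem])]
      rw [ih out, hded]
      have ht : (h t && !decide (t ∈ out)) = false := by simp [hmem]
      have key : List.filter (fun x => h x && !decide (x ∈ out))
            (t :: (PySem.List.dedup rest).filter (fun y => !(y == t)))
          = List.filter (fun x => h x && !decide (x ∈ out)) (PySem.List.dedup rest) := by
        rw [List.filter_cons_of_neg (by simp [ht]), List.filter_filter]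
        refine List.filter_congr ?_
        intro x _
        by_cases hx : x = t
        · subst hx; simp [hmem]
        · simp [hx]
      rw [key]
    · by_cases hht : h t = true
      · rw [if_pos (by simp [hmem, hht])]
        have hadd : PySem.Set.add out t = out ++ [t] := PySem.Set.add_of_not_mem hmem
        have ht : (h t && !decide (t ∈ out)) = true := by simp [hmem, hht]
        have key : (out ++ [t]) ++ List.filter (fun x => h x && !decide (x ∈ out ++ [t]))
              (PySem.List.dedup rest)
            = out ++ List.filter (fun x => h x && !decide (x ∈ out))
                (t :: (PySem.List.dedup rest).filter (fun y => !(y == t))) := by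
          simp only [List.filter_cons, ht, if_true, List.filter_filter,
            List.append_assoc, List.singleton_append]
          refine congrArg (out ++ ·) ?_
          refine congrArg (t :: ·) ?_
          refine List.filter_congr ?_
          intro x _
          by_cases hx : x = t
          · subst hx; simp
          · simp [hx, List.mem_append]
        rw [hadd, ih (out ++ [t]), hded, key]
      · have hht' : h t = false := by simpa using hht
        rw [if_neg (by simp [hht'])]
        rw [ih out, hded]
        have key : List.filter (fun x => h x && !decide (x ∈ out))
              (t :: (PySem.List.dedup rest).filter (fun y => !(y == t)))
            = List.filter (fun x => h x && !decide (x ∈ out)) (PySem.List.dedup rest) := by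
          rw [List.filter_cons_of_neg (by simp [hht']), List.filter_filter]
          refine List.filter_congr ?_
          intro x _
          by_cases hx : x = t
          · subst hx; simp [hht']
          · simp [hx]
        rw [key]

-- two or-marking sweeps compose
lemma pvZip_comp (f g : String → Bool) :
    ∀ (h0 : List Bool) (u : List String),
      List.zipWith (fun b t => b || g t) (List.zipWith (fun b t => b || f t) h0 u) u
      = List.zipWith (fun b t => b || (f t || g t)) h0 u := by
  intro h0
  induction h0 with
  | nil => intro u; simp
  | cons b bs ih =>
    intro u
    cases u with
    | nil => simp
    | cons t ts => simp [ih, Bool.or_assoc]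

-- an or-marking sweep is the identity when the marker never fires… we only need the false marker
lemma pvZip_id : ∀ (h0 : List Bool) (u : List String), h0.length = u.length →
    List.zipWith (fun b (_ : String) => b) h0 u = h0 := by
  intro h0
  induction h0 with
  | nil => intro u _; simp
  | cons b bs ih =>
    intro u hl
    cases u with
    | nil => simp at hl
    | cons t ts => simp only [List.zipWith]; exact congrArg (b :: ·) (ih ts (by simpa using hl))

-- folding or-marking sweeps over a needle list accumulates an `any`
lemma pvMark_fold (u : List String) (q : String → String → Bool) :
    ∀ (ns : List String) (h0 : List Bool), h0.length = u.length →
      ns.foldl (fun h n => List.zipWith (fun b t => b || q n t) h u) h0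
      = List.zipWith (fun b t => b || ns.any (fun n => q n t)) h0 u := by
  intro ns
  induction ns with
  | nil =>
    intro h0 hl
    simp only [List.foldl_nil, List.any_nil, Bool.or_false]
    exact (pvZip_id h0 u hl).symm
  | cons n ns ih =>
    intro h0 hl
    simp only [List.foldl_cons]
    rw [ih _ (by simp [hl]), pvZip_comp]
    simp [List.any_cons]

-- marking from all-false yields the map of the predicate
lemma pvZip_replicate (g : String → Bool) :
    ∀ (u : List String),
      List.zipWith (fun b t => b || g t) (List.replicate u.length false) u = u.map g := by
  intro u
  induction u with
  | nil => rfl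
  | cons t ts ih => simp [List.replicate_succ, ih]

-- compress pass: zip the marks with the titles and keep the marked ones
lemma pvCompress (g : String → Bool) :
    ∀ (u : List String),
      (((u.map g).zip u).filter (fun bt => bt.1)).map (·.2) = u.filter g := by
  intro u
  induction u with
  | nil => rfl
  | cons t ts ih =>
    simp only [List.zip] at ih ⊢
    by_cases hg : g t = true
    · simp [hg, ih]
    · have h0 : g t = false := by simpa using hg
      simp [h0, ih]

-- the interleaved per-pair needle order matches the appended order
lemma pvNeedles (pairs_compact : List String) (f : String → Bool) :
    pairs_compact.any (fun p => f p || f (pvSlashForm p))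
    = (pairs_compact ++ pairs_compact.map pvSlashForm).any f := by
  induction pairs_compact with
  | nil => rfl
  | cons p ps ih =>
    simp only [List.any_cons, List.map_cons, List.cons_append, List.any_append] at *
    rw [← List.any_append] at *
    rw [ih]
    cases f p <;> cases f (pvSlashForm p) <;> simp

-- ===== VERDICT (by name: the statement is the Claim_ definition above) =====
theorem filter_by_pairs_py_spec : Claim_equal_filter_by_pairs_py := by
  intro titles pairs_compact _
  show filter_by_pairs_py titles pairs_compact = filter_by_pairs_py_alt titles pairs_compact
  unfold filter_by_pairs_py filter_by_pairs_py_alt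
  simp only []
  -- A side
  have hstep : (fun (st : List String × PySem.Set String) title =>
      let t_up := PySem.Str.upper title
      let hit := pairs_compact.any (fun p => PySem.Str.isIn p t_up)
      let hit := if hit then hit else
        (PySem.Set.ofList (pairs_compact.map pvSlashForm)).any (fun s => PySem.Str.isIn s t_up)
      if hit && !(PySem.Set.contains st.2 title) then
        (st.1 ++ [title], PySem.Set.add st.2 title)
      else st)
      = (fun (st : List String × PySem.Set String) title =>
      if ((pairs_compact ++ pairs_compact.map pvSlashForm).any
            (fun n => PySem.Str.isIn n (PySem.Str.upper title)))
          && !(PySem.Set.contains st.2 title) then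
        (st.1 ++ [title], PySem.Set.add st.2 title)
      else st) := by
    funext st title
    dsimp only []
    rw [pvHit_eq pairs_compact title]
  rw [hstep]
  have hempty : (PySem.Set.empty : PySem.Set String) = ([] : List String) := rfl
  rw [hempty, pvLoop_eq]
  -- B side
  have hinner : (fun (hit : List Bool) p =>
      [p, pvSlashForm p].foldl (fun hit form =>
        List.zipWith (fun b u => b || PySem.Str.isIn form u) hit
          ((PySem.List.dedup titles).map PySem.Str.upper)) hit)
      = (fun (hit : List Bool) p =>
      List.zipWith (fun b u => b ||
          (PySem.Str.isIn p u || PySem.Str.isIn (pvSlashForm p) u))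
        hit ((PySem.List.dedup titles).map PySem.Str.upper)) := by
    funext hit p
    simp only [List.foldl_cons, List.foldl_nil]
    rw [pvZip_comp]
  rw [hinner,
    pvMark_fold ((PySem.List.dedup titles).map PySem.Str.upper)
      (fun p u => PySem.Str.isIn p u || PySem.Str.isIn (pvSlashForm p) u)
      pairs_compact (List.replicate (PySem.List.dedup titles).length false) (by simp),
    show List.replicate (PySem.List.dedup titles).length false
        = List.replicate ((PySem.List.dedup titles).map PySem.Str.upper).length false by simp,
    pvZip_replicate, List.map_map, pvCompress]
  dsimp only []
  refine List.filter_congr ?_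
  intro t _
  simp only [Function.comp_apply]
  rw [pvNeedles pairs_compact (fun n => PySem.Str.isIn n (PySem.Str.upper t))]
  simp
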